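-- pv_equiv track=rewrite | github.com/cirosantilli/project-euler-solvers | solvers/628.py | left_factorial
-- ===== SOURCE A (Python) =====
-- MOD = 1008691207
--
-- def left_factorial(n: int, mod: int = MOD) -> int:
--     """
--     Compute !n = sum_{k=0}^{n-1} k! (mod mod).
--
--     This uses the straightforward recurrence:
--         fact = k!  (mod mod)
--         sum += fact
--     """
--     if n <= 0:
--         return 0
--
--     fact = 1  # 0!
--     s = 1     # sum starts with 0!
--
--     # Add 1!, 2!, ..., (n-1)!
--     # Micro-optimization: don't mod-reduce 's' each iteration; it's safe to do once at the end.
--     for k in range(1, n):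
--         fact = (fact * k) % mod
--         s += fact
--
--     return s % mod
-- ===== SOURCE B (Python) =====
-- MOD = 1008691207
--
-- def left_factorial(n: int, mod: int = MOD) -> int:
--     """Compute !n = sum_{k=0}^{n-1} k! (mod mod) by Horner evaluation of the
--     nested form 1 + 1*(1 + 2*(1 + 3*(... + (n-1)*(1))))  -- one accumulator,
--     iterating k downwards, reducing mod `mod` at every step."""
--     if n <= 0:
--         return 0
--     acc = 1
--     for k in range(n - 1, 0, -1):
--         acc = (acc * k + 1) % mod
--     return acc % mod
-- ===== Notes on version B (the rewrite author's own statement) =====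
-- stated objective: alternative
-- what changed: B evaluates !n as the nested Horner form 1 + 1*(1 + 2*(1 + ... (n-1)*1)) with a single accumulator iterating k downwards and reducing mod m every step, instead of A's forward loop that maintains the running factorial and the running sum as two separate variables.
import Mathlib
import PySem

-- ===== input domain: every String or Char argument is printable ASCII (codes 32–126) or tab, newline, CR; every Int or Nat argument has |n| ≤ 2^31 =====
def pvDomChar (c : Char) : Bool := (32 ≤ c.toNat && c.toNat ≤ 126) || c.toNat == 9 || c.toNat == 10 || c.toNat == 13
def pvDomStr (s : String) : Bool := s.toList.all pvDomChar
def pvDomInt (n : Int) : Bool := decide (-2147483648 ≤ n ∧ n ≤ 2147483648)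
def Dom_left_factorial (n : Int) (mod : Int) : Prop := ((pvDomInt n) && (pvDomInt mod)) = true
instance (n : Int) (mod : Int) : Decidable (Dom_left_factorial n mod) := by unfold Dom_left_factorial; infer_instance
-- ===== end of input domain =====

-- B evaluates !n by backwards Horner nesting 1 + 1*(1 + 2*(1 + ... (n-1)*1)) with one accumulator, instead of A's forward loop maintaining the running factorial and running sum (alternative algorithm, same cost).


-- ===== PORT A =====
-- A: one loop 'for k in range(1, n)' maintaining (fact, s); Python's range is lazy,
-- so the loop is ported exactly as a counter recursion (no list is materialized).
def lfA_loop (mod n k fact s : Int) : Int :=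
  if _h : k < n then
    let fact' := PySem.Int.mod (fact * k) mod
    lfA_loop mod n (k + 1) fact' (s + fact')
  else s
termination_by (n - k).toNat
decreasing_by omega

def left_factorial (n : Int) (mod : Int) : Int :=
  if n ≤ 0 then 0
  else PySem.Int.mod (lfA_loop mod n 1 1 1) mod

-- ===== PORT B =====
-- B: one loop 'for k in range(n-1, 0, -1)' maintaining acc = (acc*k + 1) % mod (Horner);
-- the lazy countdown range is ported exactly as a counter recursion.
def lfB_loop (mod k acc : Int) : Int :=
  if _h : 0 < k then
    lfB_loop mod (k - 1) (PySem.Int.mod (acc * k + 1) mod)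
  else acc
termination_by k.toNat
decreasing_by omega

def left_factorial_alt (n : Int) (mod : Int) : Int :=
  if n ≤ 0 then 0
  else PySem.Int.mod (lfB_loop mod (n - 1) 1) mod

-- ===== PRECONDITION & SPEC =====
-- Pre_ excludes mod = 0 with n ≥ 1, exactly where Python A raises ZeroDivisionError.
def Pre_left_factorial (n : Int) (mod : Int) : Prop := mod ≠ 0 ∨ n ≤ 0
instance (n : Int) (mod : Int) : Decidable (Pre_left_factorial n mod) := by unfold Pre_left_factorial; infer_instance
def pvWitness_left_factorial : Int × Int := (6, 97)

def Spec_left_factorial (n : Int) (mod : Int) (out : Int) : Prop := out = left_factorial_alt n mod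
instance (n : Int) (mod : Int) (out : Int) : Decidable (Spec_left_factorial n mod out) := by unfold Spec_left_factorial; infer_instance

-- ===== CLAIM =====
def Claim_equal_left_factorial : Prop := ∀ (n : Int) (mod : Int), Dom_left_factorial n mod → Pre_left_factorial n mod → Spec_left_factorial n mod (left_factorial n mod)

-- ===== LEMMAS AND PROOFS =====

-- exact (mod-free) companions, used only in the proofs
def pvFac (k : Int) : Int :=
  if _h : 0 < k then k * pvFac (k - 1) else 1
termination_by k.toNat
decreasing_by omega

def pvSfac (k : Int) : Int :=
  if _h : 0 < k then pvSfac (k - 1) + pvFac (k - 1) else 0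
termination_by k.toNat
decreasing_by omega

def pvTail (n k : Int) : Int :=
  if _h : k < n then k * (1 + pvTail n (k + 1)) else 0
termination_by (n - k).toNat
decreasing_by omega

-- Python's % is congruent to its argument modulo m.
theorem pymod_modeq (a m : Int) : PySem.Int.mod a m ≡ a [ZMOD m] := by
  rw [Int.modEq_iff_dvd]
  refine ⟨PySem.Int.floordiv a m, ?_⟩
  linear_combination -PySem.Int.floordiv_mul_add_mod a m

-- equal floor-mods from congruence (m ≠ 0)
theorem pymod_congr {m : Int} (hm : m ≠ 0) {x y : Int} (h : x ≡ y [ZMOD m]) :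
    PySem.Int.mod x m = PySem.Int.mod y m := by
  rcases lt_trichotomy m 0 with hneg | hz | hpos
  case inr.inl => exact absurd hz hm
  · have e : ∀ z : Int, PySem.Int.mod z m = -PySem.Int.mod (-z) (-m) := by
      intro z
      have h2 := PySem.Int.mod_neg_neg (-z) (-m)
      rw [neg_neg, neg_neg] at h2
      exact h2
    rw [e x, e y]
    congr 1
    have hpos' : (0 : Int) < -m := by omega
    rw [PySem.Int.mod_eq_emod_of_pos hpos', PySem.Int.mod_eq_emod_of_pos hpos']
    rw [Int.emod_neg, Int.emod_neg]
    exact h.neg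
  · rw [PySem.Int.mod_eq_emod_of_pos hpos, PySem.Int.mod_eq_emod_of_pos hpos]
    exact h

-- A's loop, modulo m, computes s + fact * (sum of rising products k·(k+1)···j).
theorem lfA_modeq (mod n k fact s : Int) :
    lfA_loop mod n k fact s ≡ s + fact * pvTail n k [ZMOD mod] := by
  fun_induction lfA_loop mod n k fact s with
  | case1 k fact s h fact' ih =>
    rw [pvTail, dif_pos h]
    refine ih.trans ?_
    have hf : PySem.Int.mod (fact * k) mod ≡ fact * k [ZMOD mod] := pymod_modeq _ _
    have h2 : (s + PySem.Int.mod (fact * k) mod) + PySem.Int.mod (fact * k) mod * pvTail n (k + 1)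
        ≡ (s + fact * k) + (fact * k) * pvTail n (k + 1) [ZMOD mod] :=
      ((Int.ModEq.refl s).add hf).add (hf.mul_right _)
    have h3 : (s + fact * k) + (fact * k) * pvTail n (k + 1)
        = s + fact * (k * (1 + pvTail n (k + 1))) := by ring
    exact h2.trans (h3 ▸ Int.ModEq.refl _)
  | case2 k fact s h =>
    rw [pvTail, dif_neg h]
    simp

-- B's loop, modulo m, computes acc·k! + (0! + 1! + … + (k-1)!).
theorem lfB_modeq (mod k acc : Int) :
    lfB_loop mod k acc ≡ acc * pvFac k + pvSfac k [ZMOD mod] := by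
  fun_induction lfB_loop mod k acc with
  | case1 k acc h ih =>
    have hfk : pvFac k = k * pvFac (k - 1) := by rw [pvFac, dif_pos h]
    have hsk : pvSfac k = pvSfac (k - 1) + pvFac (k - 1) := by rw [pvSfac, dif_pos h]
    refine ih.trans ?_
    have ha : PySem.Int.mod (acc * k + 1) mod ≡ acc * k + 1 [ZMOD mod] := pymod_modeq _ _
    have h2 : PySem.Int.mod (acc * k + 1) mod * pvFac (k - 1) + pvSfac (k - 1)
        ≡ (acc * k + 1) * pvFac (k - 1) + pvSfac (k - 1) [ZMOD mod] :=
      (ha.mul_right _).add (Int.ModEq.refl _)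
    have h3 : (acc * k + 1) * pvFac (k - 1) + pvSfac (k - 1) = acc * pvFac k + pvSfac k := by
      rw [hfk, hsk]; ring
    exact h2.trans (h3 ▸ Int.ModEq.refl _)
  | case2 k acc h =>
    have hf : pvFac k = 1 := by rw [pvFac, dif_neg h]
    have hs : pvSfac k = 0 := by rw [pvSfac, dif_neg h]
    rw [hf, hs]
    simp

-- the rising-product tail sum is a difference of factorial prefix sums
theorem fac_tail (n : Int) : ∀ (d : Nat) (k : Int), 0 < k → k ≤ n → (n - k).toNat = d →
    pvFac (k - 1) * pvTail n k = pvSfac n - pvSfac k := by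
  intro d
  induction d with
  | zero =>
    intro k hk hkn hd
    have hkn' : k = n := by omega
    subst hkn'
    rw [pvTail, dif_neg (lt_irrefl k)]
    ring
  | succ d ih =>
    intro k hk hkn hd
    have hkn' : k < n := by omega
    have ih' := ih (k + 1) (by omega) (by omega) (by omega)
    have he : (k + 1 - 1 : Int) = k := by ring
    rw [he] at ih'
    have hfk : pvFac k = k * pvFac (k - 1) := by rw [pvFac, dif_pos hk]
    have hsk1 : pvSfac (k + 1) = pvSfac k + pvFac k := by
      rw [pvSfac, dif_pos (show (0:Int) < k + 1 by omega), he]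
    rw [pvTail, dif_pos hkn']
    linear_combination (-(1 + pvTail n (k + 1))) * hfk + ih' - hsk1

-- ===== VERDICT =====
theorem left_factorial_spec : Claim_equal_left_factorial := by
  intro n mod _ hpre
  unfold Spec_left_factorial left_factorial left_factorial_alt
  by_cases hn : n ≤ 0
  · simp [hn]
  · have hm : mod ≠ 0 := hpre.resolve_right hn
    simp only [if_neg hn]
    apply pymod_congr hm
    have hA := lfA_modeq mod n 1 1 1
    have hB := lfB_modeq mod (n - 1) 1
    have hT := fac_tail n (n - 1).toNat 1 (by omega) (by omega) (by omega)
    have hf0 : pvFac 0 = 1 := by unfold pvFac; simp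
    have hs1 : pvSfac 1 = 1 := by unfold pvSfac; simp [hf0, show pvSfac 0 = 0 from by unfold pvSfac; simp]
    have hsn : pvSfac n = pvSfac (n - 1) + pvFac (n - 1) := by
      rw [pvSfac, dif_pos (show (0:Int) < n by omega)]
    have hkey : (1 : Int) + 1 * pvTail n 1 = 1 * pvFac (n - 1) + pvSfac (n - 1) := by
      have : (1 : Int) - 1 = 0 := by ring
      rw [this, hf0] at hT
      rw [hs1] at hT
      linarith [hT, hsn]
    exact hA.trans (hkey ▸ hB.symm)
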